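-- pv_equiv track=rewrite | github.com/jpbezerra/IP-CIn | Lista-5/q3.py | tamanho_certo
-- ===== SOURCE A (Python) =====
-- def tamanho_certo(palavra):
--     tamanho_palavra = len(palavra)
--     if 32 > tamanho_palavra:
--         palavra = "0" + palavra
--         palavra = tamanho_certo(palavra)
--         return palavra
--     else:
--         return palavra
-- ===== SOURCE B (Python) =====
-- def tamanho_certo(palavra):
--     return "0" * (32 - len(palavra)) + palavra
-- ===== Notes on version B (the rewrite author's own statement) =====
-- stated objective: simpler
-- what changed: Replaces the one-character-at-a-time recursion with a closed-form pad: a zero character repeated (32 - len(palavra)) times prepended to palavra; a non-positive deficit yields an empty pad, so strings of length >= 32 are returned unchanged exactly as in A.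
import Mathlib
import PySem

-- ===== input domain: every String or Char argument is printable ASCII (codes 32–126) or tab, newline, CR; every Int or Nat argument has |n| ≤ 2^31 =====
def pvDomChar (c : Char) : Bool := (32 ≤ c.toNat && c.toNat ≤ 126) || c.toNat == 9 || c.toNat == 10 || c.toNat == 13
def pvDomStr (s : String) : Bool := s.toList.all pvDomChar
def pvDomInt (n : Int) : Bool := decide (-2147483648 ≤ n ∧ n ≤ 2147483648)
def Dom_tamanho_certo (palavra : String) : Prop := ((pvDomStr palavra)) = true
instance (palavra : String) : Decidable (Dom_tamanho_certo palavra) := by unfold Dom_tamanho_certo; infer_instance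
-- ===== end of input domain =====

-- B replaces A's one-char-at-a-time recursion with a closed-form pad ("0" * deficit + palavra); objective: simpler.

-- ===== PORT A =====
-- A's recursion on List Char: if 32 > len, prepend "0" and recurse, else return unchanged.
def tamanhoCertoA (cs : List Char) : List Char :=
  if 32 > cs.length then
    tamanhoCertoA ('0' :: cs)
  else
    cs
termination_by 32 - cs.length

def tamanho_certo (palavra : String) : String :=
  String.mk (tamanhoCertoA palavra.toList)

-- ===== PORT B =====
-- "0" * (32 - len(palavra)) + palavra : Int.toNat gives 0 for a non-positive deficit, like Python's '*'.
def tamanho_certo_alt (palavra : String) : String :=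
  String.mk (List.replicate ((32 - (palavra.toList.length : Int)).toNat) '0' ++ palavra.toList)

-- ===== PRECONDITION & SPEC =====
def Spec_tamanho_certo (palavra : String) (out : String) : Prop := out = tamanho_certo_alt palavra
instance (palavra : String) (out : String) : Decidable (Spec_tamanho_certo palavra out) := by unfold Spec_tamanho_certo; infer_instance

-- ===== CLAIM (what is proved, stated in full; the proofs are below) =====
def Claim_equal_tamanho_certo : Prop := ∀ (palavra : String), Dom_tamanho_certo palavra → Spec_tamanho_certo palavra (tamanho_certo palavra)

-- ===== LEMMAS AND PROOFS =====
theorem tamanhoCertoA_eq (cs : List Char) :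
    tamanhoCertoA cs = List.replicate (32 - cs.length) '0' ++ cs := by
  by_cases h : 32 > cs.length
  · rw [tamanhoCertoA, if_pos h, tamanhoCertoA_eq ('0' :: cs)]
    have hk : 32 - cs.length = (32 - ('0' :: cs).length) + 1 := by
      simp only [List.length_cons]; omega
    rw [hk, List.replicate_succ', List.append_assoc]
    rfl
  · rw [tamanhoCertoA, if_neg h]
    have : 32 - cs.length = 0 := by omega
    simp [this]
termination_by 32 - cs.length

-- ===== VERDICT (by name: the statement is the Claim_ definition above) =====
theorem tamanho_certo_spec : Claim_equal_tamanho_certo := by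
  intro palavra _
  unfold Spec_tamanho_certo tamanho_certo tamanho_certo_alt
  rw [tamanhoCertoA_eq]
  have h : ((32 : Int) - (palavra.toList.length : Int)).toNat = 32 - palavra.toList.length := by
    omega
  rw [h]
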